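-- pv_equiv track=rewrite | github.com/trytrihjyuki/mgr | run_experiment.py | _generate_time_windows
-- ===== SOURCE A (Python) =====
-- from typing import List, Dict, Any, Optional
--
-- def _generate_time_windows(start_hour: int, end_hour: int, window_minutes: int) -> List[Dict[str, Any]]:
--     """Generate time windows following Hikima's 5-minute interval approach."""
--     scenarios = []
--
--     # Calculate total minutes in the time range
--     total_minutes = (end_hour - start_hour) * 60
--
--     # Generate scenarios every 5 minutes (following Hikima's tt_tmp * 5 approach)
--     for tt_tmp in range(0, total_minutes // 5):
--         tt = tt_tmp * 5  # 5-minute intervals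
--         h, m = divmod(tt, 60)
--
--         start_scenario_hour = start_hour + h
--         start_scenario_minute = m
--
--         # End time is start + window_minutes + 30 seconds (following Hikima)
--         end_scenario_minute = start_scenario_minute + window_minutes
--         end_scenario_hour = start_scenario_hour
--
--         # Handle minute overflow
--         if end_scenario_minute >= 60:
--             end_scenario_hour += end_scenario_minute // 60
--             end_scenario_minute = end_scenario_minute % 60
--
--         # Stop if we exceed the end hour
--         if end_scenario_hour > end_hour or (end_scenario_hour == end_hour and end_scenario_minute > 0):
--             break
--
--         scenario = {
--             'scenario_index': tt_tmp,
--             'start_hour': start_scenario_hour,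
--             'start_minute': start_scenario_minute,
--             'start_second': 0,
--             'end_hour': end_scenario_hour,
--             'end_minute': end_scenario_minute,
--             'end_second': 30,  # Hikima adds 30 seconds
--             'window_minutes': window_minutes
--         }
--         scenarios.append(scenario)
--
--     return scenarios
-- ===== SOURCE B (Python) =====
-- def _generate_time_windows(start_hour: int, end_hour: int, window_minutes: int):
--     """Closed-form window count, then one comprehension over absolute minutes."""
--     total_minutes = (end_hour - start_hour) * 60
--     limit = max(0, min(total_minutes // 5,
--                        (total_minutes - window_minutes) // 5 + 1))
--     return [_window(start_hour, window_minutes, tt_tmp) for tt_tmp in range(limit)]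
--
--
-- def _window(start_hour: int, window_minutes: int, tt_tmp: int):
--     start_abs = start_hour * 60 + 5 * tt_tmp
--     sh, sm = divmod(start_abs, 60)
--     em0 = sm + window_minutes
--     # minutes are normalised only past the hour mark (a negative sum stays as is)
--     eh, em = (sh + em0 // 60, em0 % 60) if em0 >= 60 else (sh, em0)
--     return {
--         'scenario_index': tt_tmp,
--         'start_hour': sh,
--         'start_minute': sm,
--         'start_second': 0,
--         'end_hour': eh,
--         'end_minute': em,
--         'end_second': 30,
--         'window_minutes': window_minutes,
--     }
-- ===== Notes on version B (the rewrite author's own statement) =====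
-- stated objective: simpler
-- what changed: B replaces A's loop with an in-body break by a closed-form count of accepted windows (the break point is monotone in the scenario index) followed by a single comprehension computing each window from divmod on absolute start minutes.
import Mathlib
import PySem

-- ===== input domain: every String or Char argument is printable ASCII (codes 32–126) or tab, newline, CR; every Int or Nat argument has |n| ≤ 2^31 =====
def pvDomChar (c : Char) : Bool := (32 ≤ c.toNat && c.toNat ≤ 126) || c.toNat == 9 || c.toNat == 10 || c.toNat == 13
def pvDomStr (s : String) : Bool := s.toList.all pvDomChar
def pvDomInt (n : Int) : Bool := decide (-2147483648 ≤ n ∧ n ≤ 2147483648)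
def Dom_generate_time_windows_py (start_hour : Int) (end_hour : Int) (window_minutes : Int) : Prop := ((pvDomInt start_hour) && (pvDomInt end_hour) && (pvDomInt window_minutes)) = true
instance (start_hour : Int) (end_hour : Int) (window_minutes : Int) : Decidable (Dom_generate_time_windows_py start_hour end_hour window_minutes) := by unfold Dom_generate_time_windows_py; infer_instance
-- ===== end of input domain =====

-- B computes the number of accepted windows in closed form (the break is monotone in the index)
-- and emits each window from divmod on absolute start minutes, replacing A's in-loop break;
-- objective: simpler.


-- ===== PORT A =====
-- loop of A: iterates over the remaining tt_tmp values, breaking when the window exceeds end_hour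
def pvALoop (start_hour : Int) (end_hour : Int) (window_minutes : Int) :
    List Int → List (List (String × Int)) → List (List (String × Int))
  | [], acc => acc
  | tt_tmp :: rest, acc =>
    let tt := tt_tmp * 5
    let h := PySem.Int.floordiv tt 60
    let m := PySem.Int.mod tt 60
    let start_scenario_hour := start_hour + h
    let start_scenario_minute := m
    let em0 := start_scenario_minute + window_minutes
    let end_scenario_hour := if em0 ≥ 60 then start_scenario_hour + PySem.Int.floordiv em0 60 else start_scenario_hour
    let end_scenario_minute := if em0 ≥ 60 then PySem.Int.mod em0 60 else em0
    if end_scenario_hour > end_hour ∨ (end_scenario_hour = end_hour ∧ end_scenario_minute > 0) then acc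
    else pvALoop start_hour end_hour window_minutes rest
      (acc ++ [[("scenario_index", tt_tmp), ("start_hour", start_scenario_hour),
                ("start_minute", start_scenario_minute), ("start_second", 0),
                ("end_hour", end_scenario_hour), ("end_minute", end_scenario_minute),
                ("end_second", 30), ("window_minutes", window_minutes)]])

def generate_time_windows_py (start_hour : Int) (end_hour : Int) (window_minutes : Int) : List (List (String × Int)) :=
  let total_minutes := (end_hour - start_hour) * 60
  pvALoop start_hour end_hour window_minutes (PySem.List.pyRange 0 (PySem.Int.floordiv total_minutes 5) 1) []

-- ===== PORT B =====
-- helper _window of Source B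
def pvWindow (start_hour : Int) (window_minutes : Int) (tt_tmp : Int) : List (String × Int) :=
  let start_abs := start_hour * 60 + 5 * tt_tmp
  let sh := PySem.Int.floordiv start_abs 60
  let sm := PySem.Int.mod start_abs 60
  let em0 := sm + window_minutes
  let eh := if em0 ≥ 60 then sh + PySem.Int.floordiv em0 60 else sh
  let em := if em0 ≥ 60 then PySem.Int.mod em0 60 else em0
  [("scenario_index", tt_tmp), ("start_hour", sh), ("start_minute", sm), ("start_second", 0),
   ("end_hour", eh), ("end_minute", em), ("end_second", 30), ("window_minutes", window_minutes)]

def generate_time_windows_py_alt (start_hour : Int) (end_hour : Int) (window_minutes : Int) : List (List (String × Int)) :=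
  let total_minutes := (end_hour - start_hour) * 60
  let limit := max 0 (min (PySem.Int.floordiv total_minutes 5)
                          (PySem.Int.floordiv (total_minutes - window_minutes) 5 + 1))
  (PySem.List.pyRange 0 limit 1).map (pvWindow start_hour window_minutes)

-- ===== PRECONDITION & SPEC =====
def Spec_generate_time_windows_py (start_hour : Int) (end_hour : Int) (window_minutes : Int) (out : List (List (String × Int))) : Prop := out = generate_time_windows_py_alt start_hour end_hour window_minutes
instance (start_hour : Int) (end_hour : Int) (window_minutes : Int) (out : List (List (String × Int))) : Decidable (Spec_generate_time_windows_py start_hour end_hour window_minutes out) := by unfold Spec_generate_time_windows_py; infer_instance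

-- ===== CLAIM (what is proved, stated in full; the proofs are below) =====
def Claim_equal_generate_time_windows_py : Prop := ∀ (start_hour : Int) (end_hour : Int) (window_minutes : Int), Dom_generate_time_windows_py start_hour end_hour window_minutes → Spec_generate_time_windows_py start_hour end_hour window_minutes (generate_time_windows_py start_hour end_hour window_minutes)

-- ===== LEMMAS AND PROOFS =====

-- A's break condition at index k (0 ≤ k < total//5) fails exactly when k ≤ ((e-s)*60 - w) // 5
theorem pv_break_iff (s e w k : Int) (_hk : 0 ≤ k)
    (hk5 : k < PySem.Int.floordiv ((e - s) * 60) 5) :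
    (let m := PySem.Int.mod (k * 5) 60
     let h := PySem.Int.floordiv (k * 5) 60
     let em0 := m + w
     let eh := if em0 ≥ 60 then s + h + PySem.Int.floordiv em0 60 else s + h
     let em := if em0 ≥ 60 then PySem.Int.mod em0 60 else em0
     (eh > e ∨ (eh = e ∧ em > 0))) ↔ PySem.Int.floordiv ((e - s) * 60 - w) 5 < k := by
  simp only [PySem.Int.floordiv_eq_ediv_of_pos (by norm_num : (0:Int) < 60),
             PySem.Int.mod_eq_emod_of_pos (by norm_num : (0:Int) < 60),
             PySem.Int.floordiv_eq_ediv_of_pos (by norm_num : (0:Int) < 5)] at *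
  split_ifs with h60 <;> omega

-- A's scenario at index k equals B's window
theorem pv_scen_eq (s w k : Int) (_hk : 0 ≤ k) :
    (let m := PySem.Int.mod (k * 5) 60
     let h := PySem.Int.floordiv (k * 5) 60
     let em0 := m + w
     let eh := if em0 ≥ 60 then s + h + PySem.Int.floordiv em0 60 else s + h
     let em := if em0 ≥ 60 then PySem.Int.mod em0 60 else em0
     ([("scenario_index", k), ("start_hour", s + h), ("start_minute", m), ("start_second", (0:Int)),
       ("end_hour", eh), ("end_minute", em), ("end_second", 30), ("window_minutes", w)]
       : List (String × Int))) = pvWindow s w k := by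
  simp only [pvWindow,
             PySem.Int.floordiv_eq_ediv_of_pos (by norm_num : (0:Int) < 60),
             PySem.Int.mod_eq_emod_of_pos (by norm_num : (0:Int) < 60)]
  split_ifs with h60 <;> simp only [List.cons.injEq, Prod.mk.injEq, true_and, and_true] <;> omega

-- loop characterisation: from index a onwards, A appends exactly B's windows up to the cutoff
theorem pvALoop_eq (s e w : Int) : ∀ (n : Nat) (a : Int) (acc : List (List (String × Int))),
    0 ≤ a → (PySem.Int.floordiv ((e - s) * 60) 5 - a).toNat = n →
    pvALoop s e w (PySem.List.pyRange a (PySem.Int.floordiv ((e - s) * 60) 5) 1) acc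
      = acc ++ (PySem.List.pyRange a
          (min (PySem.Int.floordiv ((e - s) * 60) 5) (PySem.Int.floordiv ((e - s) * 60 - w) 5 + 1)) 1).map
          (pvWindow s w) := by
  intro n
  induction n with
  | zero =>
    intro a acc ha hn
    have hNa : PySem.Int.floordiv ((e - s) * 60) 5 ≤ a := by omega
    rw [PySem.List.pyRange_one_eq_nil hNa, PySem.List.pyRange_one_eq_nil (by omega)]
    simp [pvALoop]
  | succ n ih =>
    intro a acc ha hn
    have haN : a < PySem.Int.floordiv ((e - s) * 60) 5 := by omega
    rw [PySem.List.pyRange_one_cons haN]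
    show (if _ then acc else _) = _
    by_cases hacc : a ≤ PySem.Int.floordiv ((e - s) * 60 - w) 5
    · rw [if_neg (by rw [pv_break_iff s e w a ha haN]; omega)]
      rw [ih (a + 1) _ (by omega) (by omega)]
      rw [show PySem.List.pyRange a (min (PySem.Int.floordiv ((e - s) * 60) 5) (PySem.Int.floordiv ((e - s) * 60 - w) 5 + 1)) 1
            = a :: PySem.List.pyRange (a + 1) (min (PySem.Int.floordiv ((e - s) * 60) 5) (PySem.Int.floordiv ((e - s) * 60 - w) 5 + 1)) 1
          from PySem.List.pyRange_one_cons (by omega)]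
      simp only [List.map_cons, List.append_assoc, List.singleton_append]
      exact congrArg (fun x => acc ++ x :: List.map (pvWindow s w)
        (PySem.List.pyRange (a + 1) (min (PySem.Int.floordiv ((e - s) * 60) 5)
          (PySem.Int.floordiv ((e - s) * 60 - w) 5 + 1)) 1)) (pv_scen_eq s w a ha)
    · rw [if_pos (by rw [pv_break_iff s e w a ha haN]; omega)]
      rw [PySem.List.pyRange_one_eq_nil (by omega)]
      simp

-- ===== VERDICT (by name: the statement is the Claim_ definition above) =====
theorem generate_time_windows_py_spec : Claim_equal_generate_time_windows_py := by
  intro s e w _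
  unfold Spec_generate_time_windows_py generate_time_windows_py generate_time_windows_py_alt
  show pvALoop s e w (PySem.List.pyRange 0 (PySem.Int.floordiv ((e - s) * 60) 5) 1) []
      = (PySem.List.pyRange 0 (max 0 (min (PySem.Int.floordiv ((e - s) * 60) 5)
          (PySem.Int.floordiv ((e - s) * 60 - w) 5 + 1))) 1).map (pvWindow s w)
  rw [pvALoop_eq s e w _ 0 [] le_rfl rfl, List.nil_append]
  by_cases h : 0 ≤ (min (PySem.Int.floordiv ((e - s) * 60) 5)
      (PySem.Int.floordiv ((e - s) * 60 - w) 5 + 1))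
  · rw [max_eq_right h]
  · rw [PySem.List.pyRange_one_eq_nil (by omega),
        PySem.List.pyRange_one_eq_nil (by omega : max 0 (min (PySem.Int.floordiv ((e - s) * 60) 5)
          (PySem.Int.floordiv ((e - s) * 60 - w) 5 + 1)) ≤ 0)]
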